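-- pv_equiv track=rewrite | github.com/tanushka816/polynomialEqv | mono_logic.py | know_pow
-- ===== SOURCE A (Python) =====
-- def know_pow(poly):
--     set_var = set()
--     for e in poly:
--         if e.isalpha():
--             set_var.add(e)
--
--     max_pow = 1
--     dict_of_vars = dict.fromkeys(set_var, 0)
--
--     for e in range(len(poly)-1):
--         if poly[e].isalpha():
--             if poly[e+1] == "^":
--                 i = e + 2
--                 tmp_pow = ""
--                 while i < len(poly) and poly[i].isdigit():
--                     tmp_pow += poly[i]
--                     i += 1
--                 dict_of_vars[poly[e]] += int(tmp_pow)
--                 e += i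
--     for e in dict_of_vars:
--         if dict_of_vars[e] > max_pow:
--             max_pow = dict_of_vars[e]
--     return max_pow
-- ===== SOURCE B (Python) =====
-- def know_pow(poly):
--     variables = set()
--     for ch in poly:
--         if ch.isalpha():
--             variables.add(ch)
--     best = 1
--     n = len(poly)
--     for v in variables:
--         total = 0
--         for i in range(n - 1):
--             if poly[i] == v and poly[i + 1] == '^':
--                 j = i + 2
--                 digits = ""
--                 while j < n and poly[j].isdigit():
--                     digits += poly[j]
--                     j += 1
--                 total += int(digits)
--         best = max(best, total)
--     return best
-- ===== Notes on version B (the rewrite author's own statement) =====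
-- stated objective: alternative
-- what changed: A's single left-to-right scan that accumulates per-variable exponent sums in a dict is replaced by one plain rescan of the string per distinct variable with a running maximum, eliminating the dict entirely.
import Mathlib
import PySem

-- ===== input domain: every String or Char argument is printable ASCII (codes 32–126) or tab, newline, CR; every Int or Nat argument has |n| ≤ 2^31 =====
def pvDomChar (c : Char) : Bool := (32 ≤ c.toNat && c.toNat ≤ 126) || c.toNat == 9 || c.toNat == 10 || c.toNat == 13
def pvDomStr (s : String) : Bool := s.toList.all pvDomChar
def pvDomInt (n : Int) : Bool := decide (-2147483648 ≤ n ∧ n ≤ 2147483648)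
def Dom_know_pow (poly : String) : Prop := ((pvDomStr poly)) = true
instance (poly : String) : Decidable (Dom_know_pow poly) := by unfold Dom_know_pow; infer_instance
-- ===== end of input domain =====

-- B replaces A's single scan with a dict of per-variable sums by one plain scan per distinct
-- variable with a running maximum (objective: alternative decomposition, no dict).

-- ===== PORT A =====
-- the inner while loop collecting the digit run after '^' (shared verbatim by both Pythons)
def kpDigits : List Char → List Char
  | [] => []
  | c :: r => if PySem.Chars.isdigit c then c :: kpDigits r else []

-- int(tmp_pow); ofChars? is none (ValueError) exactly when the run is empty — excluded by Pre_
def kpRunVal (cs : List Char) (e : Nat) : Int :=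
  (PySem.Int.ofChars? (kpDigits (cs.drop (e + 2)))).getD 0

-- body of A's position loop (indices from List.range (len-1) are in bounds, so getD is exact)
def kpStepA (cs : List Char) (d : PySem.Dict Char Int) (e : Nat) : PySem.Dict Char Int :=
  if PySem.Chars.isalpha (cs.getD e ' ') then
    if cs.getD (e + 1) ' ' = '^' then
      d.modify (cs.getD e ' ') 0 (· + kpRunVal cs e)
    else d
  else d

def know_pow (poly : String) : Int :=
  let cs := poly.toList
  let set_var : PySem.Set Char :=
    cs.foldl (fun s c => if PySem.Chars.isalpha c then PySem.Set.add s c else s) PySem.Set.empty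
  let dict_of_vars : PySem.Dict Char Int :=
    set_var.foldl (fun d c => d.insert c 0) PySem.Dict.empty
  let d := (List.range (cs.length - 1)).foldl (kpStepA cs) dict_of_vars
  d.keys.foldl (fun max_pow k => if d.getD k 0 > max_pow then d.getD k 0 else max_pow) 1

-- ===== PORT B =====
-- per-variable total: one scan of all positions, summing the digit runs after "v^"
def kpTotal (cs : List Char) (v : Char) : Int :=
  (List.range (cs.length - 1)).foldl
    (fun total i =>
      if cs.getD i ' ' = v ∧ cs.getD (i + 1) ' ' = '^' then total + kpRunVal cs i else total) 0

def know_pow_alt (poly : String) : Int :=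
  let cs := poly.toList
  let vars_ : PySem.Set Char :=
    cs.foldl (fun s c => if PySem.Chars.isalpha c then PySem.Set.add s c else s) PySem.Set.empty
  vars_.foldl (fun best v => max best (kpTotal cs v)) 1

-- ===== PRECONDITION & SPEC =====
-- Pre_ excludes exactly the inputs on which Python A raises ValueError: some letter is
-- immediately followed by a caret with no digit right after it, so the collected digit run is
-- empty and int() raises.  B raises on exactly the same inputs, so nothing else is excluded.
def Pre_know_pow (poly : String) : Prop :=
  ∀ e ∈ List.range (poly.toList.length - 1),
    PySem.Chars.isalpha (poly.toList.getD e ' ') = true →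
    poly.toList.getD (e + 1) ' ' = '^' →
    (e + 2 < poly.toList.length ∧ PySem.Chars.isdigit (poly.toList.getD (e + 2) ' ') = true)
instance (poly : String) : Decidable (Pre_know_pow poly) := by unfold Pre_know_pow; infer_instance

def pvWitness_know_pow : String := "x^2+y^10*z - 4"

def Spec_know_pow (poly : String) (out : Int) : Prop := out = know_pow_alt poly
instance (poly : String) (out : Int) : Decidable (Spec_know_pow poly out) := by unfold Spec_know_pow; infer_instance

-- ===== CLAIM (what is proved, stated in full; the proofs are below) =====
def Claim_equal_know_pow : Prop := ∀ (poly : String), Dom_know_pow poly → Pre_know_pow poly → Spec_know_pow poly (know_pow poly)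

-- ===== LEMMAS AND PROOFS =====

-- A's dict loop: the entry of an alphabetic key c is its starting value plus the sum of the
-- digit-run values at the positions where c is followed by '^'.
theorem kp_dict_getD (cs : List Char) (c : Char) (hc : PySem.Chars.isalpha c = true) :
    ∀ (l : List Nat) (d : PySem.Dict Char Int),
      (l.foldl (kpStepA cs) d).getD c 0 =
        d.getD c 0 +
          ((l.filter (fun e => decide (cs.getD e ' ' = c ∧ cs.getD (e + 1) ' ' = '^'))).map
            (kpRunVal cs)).sum := by
  intro l
  induction l with
  | nil => intro d; simp
  | cons e l ih =>
    intro d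
    rw [List.foldl_cons, ih]
    by_cases h3 : cs.getD e ' ' = c
    · by_cases h2 : cs.getD (e + 1) ' ' = '^'
      · rw [List.filter_cons_of_pos (by simp only [decide_eq_true_eq]; exact ⟨h3, h2⟩), List.map_cons, List.sum_cons]
        have hstep : kpStepA cs d e = d.modify c 0 (· + kpRunVal cs e) := by
          unfold kpStepA
          rw [h3, if_pos hc, if_pos h2]
        rw [hstep, PySem.Dict.getD_modify_self]
        ring
      · rw [List.filter_cons_of_neg (by simp only [decide_eq_true_eq, not_and]; exact fun _ => h2)]
        have hstep : kpStepA cs d e = d := by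
          unfold kpStepA
          rw [if_neg h2]
          split_ifs <;> rfl
        rw [hstep]
    · rw [List.filter_cons_of_neg (by simp only [decide_eq_true_eq, not_and]; exact fun hh => absurd hh h3)]
      have hne : c ≠ cs.getD e ' ' := fun h => h3 h.symm
      have hstep : (kpStepA cs d e).getD c 0 = d.getD c 0 := by
        unfold kpStepA
        split_ifs with h1 h2
        · exact PySem.Dict.getD_modify_of_ne d 0 _ hne
        · rfl
        · rfl
      rw [hstep]

-- B's inner loop computes the same filtered sum.
theorem kp_total_fold (cs : List Char) (c : Char) :
    ∀ (l : List Nat) (t : Int),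
      l.foldl (fun total i =>
          if cs.getD i ' ' = c ∧ cs.getD (i + 1) ' ' = '^' then total + kpRunVal cs i else total) t =
        t + ((l.filter (fun e => decide (cs.getD e ' ' = c ∧ cs.getD (e + 1) ' ' = '^'))).map
          (kpRunVal cs)).sum := by
  intro l
  induction l with
  | nil => intro t; simp
  | cons e l ih =>
    intro t
    rw [List.foldl_cons]
    by_cases h : cs.getD e ' ' = c ∧ cs.getD (e + 1) ' ' = '^'
    · rw [if_pos h, ih, List.filter_cons_of_pos (by simpa using h), List.map_cons, List.sum_cons]
      ring
    · rw [if_neg h, ih, List.filter_cons_of_neg (by simpa using h)]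

-- the set loop is Set.update with the alpha filter
theorem kp_set_build (l : List Char) :
    ∀ (s : PySem.Set Char),
      l.foldl (fun s c => if PySem.Chars.isalpha c then PySem.Set.add s c else s) s =
        PySem.Set.update s (l.filter PySem.Chars.isalpha) := by
  induction l with
  | nil => intro s; simp [PySem.Set.update_nil]
  | cons c l ih =>
    intro s
    simp only [List.foldl_cons, List.filter_cons]
    by_cases h : PySem.Chars.isalpha c = true
    · simp only [h, if_true, ih, PySem.Set.update_cons]
    · simp only [h, Bool.false_eq_true, if_false, ih]

-- dict.fromkeys(set_var, 0): every lookup (default 0) is 0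
theorem kp_fromkeys_getD (l : List Char) :
    ∀ (d : PySem.Dict Char Int), (∀ k, d.getD k 0 = 0) →
      ∀ k, (l.foldl (fun d c => d.insert c (0 : Int)) d).getD k 0 = 0 := by
  induction l with
  | nil => intro d h k; simpa using h k
  | cons c l ih =>
    intro d h k
    simp only [List.foldl_cons]
    refine ih _ (fun k' => ?_) k
    rw [PySem.Dict.getD_insert]
    split_ifs with h'
    · rfl
    · exact h k'

-- keys of dict.fromkeys(l, 0) built from the empty dict
theorem kp_fromkeys_keys (l : List Char) :
    (l.foldl (fun d c => d.insert c (0 : Int)) PySem.Dict.empty).keys = PySem.Set.ofList l := by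
  have h := PySem.Dict.keys_foldl_insert l (fun _ _ => (0 : Int)) PySem.Dict.empty
  simpa [PySem.Dict.keys_empty, PySem.Set.update_empty] using h

-- A's position loop never adds a key (every modified key is already present)
theorem kp_keys_stable (cs : List Char) :
    ∀ (l : List Nat) (d : PySem.Dict Char Int),
      (∀ e ∈ l, PySem.Chars.isalpha (cs.getD e ' ') = true → d.contains (cs.getD e ' ') = true) →
      (l.foldl (kpStepA cs) d).keys = d.keys := by
  intro l
  induction l with
  | nil => intro d _; rfl
  | cons e l ih =>
    intro d h
    simp only [List.foldl_cons]
    have hstepkeys : (kpStepA cs d e).keys = d.keys := by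
      unfold kpStepA
      split_ifs with h1 h2
      · have hc := h e (List.mem_cons_self) h1
        rw [PySem.Dict.keys_modify,
          PySem.Dict.keys_insert_of_contains]
        exact hc
      · rfl
      · rfl
    rw [ih (kpStepA cs d e) ?_, hstepkeys]
    intro e' he' ha
    have := h e' (List.mem_cons_of_mem _ he') ha
    unfold kpStepA
    split_ifs with h1 h2
    · rw [PySem.Dict.contains_modify]
      simp only [Bool.or_eq_true, beq_iff_eq]
      exact Or.inr this
    · exact this
    · exact this

-- ===== VERDICT (by name: the statement is the Claim_ definition above) =====
-- dF.getD k 0 on an alphabetic key k equals B's kpTotal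
theorem kp_value_eq (cs : List Char) (k : Char) (hk : PySem.Chars.isalpha k = true) :
    ((List.range (cs.length - 1)).foldl (kpStepA cs)
        ((PySem.Set.ofList (cs.filter PySem.Chars.isalpha)).foldl
          (fun d c => d.insert c (0 : Int)) PySem.Dict.empty)).getD k 0 = kpTotal cs k := by
  rw [kp_dict_getD cs k hk,
    kp_fromkeys_getD _ _ (fun k' => PySem.Dict.getD_empty k' 0) k]
  unfold kpTotal
  rw [kp_total_fold]

theorem know_pow_spec : Claim_equal_know_pow := by
  intro poly _ _
  show know_pow poly = know_pow_alt poly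
  unfold know_pow know_pow_alt
  dsimp only
  rw [kp_set_build, PySem.Set.update_empty]
  have hSnd := PySem.Set.nodup_ofList (poly.toList.filter PySem.Chars.isalpha)
  have hkeys0 :
      ((PySem.Set.ofList (poly.toList.filter PySem.Chars.isalpha)).foldl
          (fun d c => d.insert c (0 : Int)) PySem.Dict.empty).keys =
        PySem.Set.ofList (poly.toList.filter PySem.Chars.isalpha) := by
    rw [kp_fromkeys_keys]
    exact PySem.Set.ofList_eq_self_of_nodup _ hSnd
  have hcontains : ∀ e ∈ List.range (poly.toList.length - 1),
      PySem.Chars.isalpha (poly.toList.getD e ' ') = true →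
      ((PySem.Set.ofList (poly.toList.filter PySem.Chars.isalpha)).foldl
          (fun d c => d.insert c (0 : Int)) PySem.Dict.empty).contains (poly.toList.getD e ' ') = true := by
    intro e he ha
    rw [PySem.Dict.contains_iff_mem_keys, hkeys0, PySem.Set.mem_ofList]
    have hlt : e < poly.toList.length := by
      have := List.mem_range.mp he; omega
    rw [List.getD_eq_getElem poly.toList ' ' hlt] at ha ⊢
    exact List.mem_filter.mpr ⟨poly.toList.getElem_mem hlt, ha⟩
  rw [kp_keys_stable poly.toList (List.range (poly.toList.length - 1)) _ hcontains, hkeys0]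
  apply PySem.List.foldl_congr_mem
  intro acc k hkmem
  have hk : PySem.Chars.isalpha k = true := by
    rw [PySem.Set.mem_ofList] at hkmem
    exact (List.mem_filter.mp hkmem).2
  rw [kp_value_eq poly.toList k hk]
  rcases lt_or_ge acc (kpTotal poly.toList k) with h | h
  · rw [if_pos h, max_eq_right h.le]
  · rw [if_neg (not_lt.mpr h), max_eq_left h]
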